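-- pv_equiv track=rewrite | github.com/Kailexi/RUDN_sem1 | lab5/lab5dop.py | get_matrix_excluding_row_and_col
-- ===== SOURCE A (Python) =====
-- def get_matrix_excluding_row_and_col(matrix, row, col):
--     matrix1 = []
--     for y in range(row):
--         new_row = []
--         for x in range(col):
--             new_row.append(matrix[y][x])
--         matrix1.append(new_row)
--     matrix2 = []
--     for y in range(row + 1, len(matrix)):
--         new_row = []
--         for x in range(col):
--             new_row.append(matrix[y][x])
--         matrix2.append(new_row)
--     matrix3 = []
--     for y in range(row):
--         new_row = []
--         for x in range(col + 1, len(matrix[y])):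
--             new_row.append(matrix[y][x])
--         matrix3.append(new_row)
--     matrix4 = []
--     for y in range(row + 1, len(matrix)):
--         new_row = []
--         for x in range(col + 1, len(matrix[y])):
--             new_row.append(matrix[y][x])
--         matrix4.append(new_row)
--     return matrix1, matrix2, matrix3, matrix4
-- ===== SOURCE B (Python) =====
-- def get_matrix_excluding_row_and_col(matrix, row, col):
--     matrix1, matrix2, matrix3, matrix4 = [], [], [], []
--     for y in range(len(matrix)):
--         if y == row:
--             continue
--         r = matrix[y]
--         left = [r[x] for x in range(col)]
--         right = [r[x] for x in range(col + 1, len(r))]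
--         if y < row:
--             matrix1.append(left)
--             matrix3.append(right)
--         else:
--             matrix2.append(left)
--             matrix4.append(right)
--     return matrix1, matrix2, matrix3, matrix4
-- ===== Notes on version B (the rewrite author's own statement) =====
-- stated objective: alternative
-- what changed: Replaces A's four separate passes (two loops over the rows above `row`, two over the rows below) with a single pass over all row indices that skips y==row, builds each kept row's left and right halves once, and routes them to the top or bottom quadrant pair.
-- outside the precondition, e.g. on get_matrix_excluding_row_and_col([[1]], -2, 0): A returns ([], [[], []], [], [[], []]), B returns ([], [[]], [], [[]])
import Mathlib
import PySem

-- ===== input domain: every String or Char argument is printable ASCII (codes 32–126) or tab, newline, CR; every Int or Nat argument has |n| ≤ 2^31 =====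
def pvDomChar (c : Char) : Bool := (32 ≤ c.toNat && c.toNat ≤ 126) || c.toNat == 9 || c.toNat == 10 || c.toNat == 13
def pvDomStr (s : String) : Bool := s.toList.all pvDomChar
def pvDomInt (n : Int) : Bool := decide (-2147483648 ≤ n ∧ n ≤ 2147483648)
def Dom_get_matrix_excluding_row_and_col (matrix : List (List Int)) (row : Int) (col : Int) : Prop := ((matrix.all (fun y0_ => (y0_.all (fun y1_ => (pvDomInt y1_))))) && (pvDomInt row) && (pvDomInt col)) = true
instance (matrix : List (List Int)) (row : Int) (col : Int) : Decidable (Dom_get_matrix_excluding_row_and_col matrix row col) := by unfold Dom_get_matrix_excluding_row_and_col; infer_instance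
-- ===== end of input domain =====

-- B makes one pass over the row indices instead of A's four separate passes; return values proved
-- equal on Pre_ (objective: alternative decomposition, same cost).

-- ===== PORT A =====
-- matrix[y] : Python indexing (negative wraps, out of range raises → excluded by Pre_)
def pvRowAt (matrix : List (List Int)) (y : Int) : List Int :=
  (PySem.List.pyGet? matrix y).getD []

-- inner loop 'for x in range(col): new_row.append(matrix[y][x])'
def pvLeftHalf (matrix : List (List Int)) (col : Int) (y : Int) : List Int :=
  (PySem.List.pyRange 0 col 1).foldl
    (fun new_row x => new_row ++ [(PySem.List.pyGet? (pvRowAt matrix y) x).getD 0]) []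

-- inner loop 'for x in range(col + 1, len(matrix[y])): new_row.append(matrix[y][x])'
def pvRightHalf (matrix : List (List Int)) (col : Int) (y : Int) : List Int :=
  (PySem.List.pyRange (col + 1) ((pvRowAt matrix y).length : Int) 1).foldl
    (fun new_row x => new_row ++ [(PySem.List.pyGet? (pvRowAt matrix y) x).getD 0]) []

def get_matrix_excluding_row_and_col (matrix : List (List Int)) (row : Int) (col : Int) : List (List Int) × List (List Int) × List (List Int) × List (List Int) :=
  let matrix1 := (PySem.List.pyRange 0 row 1).foldl
    (fun acc y => acc ++ [pvLeftHalf matrix col y]) []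
  let matrix2 := (PySem.List.pyRange (row + 1) (matrix.length : Int) 1).foldl
    (fun acc y => acc ++ [pvLeftHalf matrix col y]) []
  let matrix3 := (PySem.List.pyRange 0 row 1).foldl
    (fun acc y => acc ++ [pvRightHalf matrix col y]) []
  let matrix4 := (PySem.List.pyRange (row + 1) (matrix.length : Int) 1).foldl
    (fun acc y => acc ++ [pvRightHalf matrix col y]) []
  (matrix1, matrix2, matrix3, matrix4)

-- ===== PORT B =====
-- single pass over y ∈ range(len(matrix)), skipping y == row, routing left/right halves
def get_matrix_excluding_row_and_col_alt (matrix : List (List Int)) (row : Int) (col : Int) : List (List Int) × List (List Int) × List (List Int) × List (List Int) :=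
  (PySem.List.pyRange 0 (matrix.length : Int) 1).foldl
    (fun st y =>
      if y = row then st
      else if y < row then
        (st.1 ++ [pvLeftHalf matrix col y], st.2.1, st.2.2.1 ++ [pvRightHalf matrix col y], st.2.2.2)
      else
        (st.1, st.2.1 ++ [pvLeftHalf matrix col y], st.2.2.1, st.2.2.2 ++ [pvRightHalf matrix col y]))
    ([], [], [], [])

-- ===== PRECONDITION & SPEC =====
-- Pre_ excludes (a) row ≤ -2, where A returns but its range(row+1, len(matrix)) walks negative
-- indices so Python wrap-around re-reads rows from the end (an artefact of A's indexing; B keeps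
-- each row once), and (b) every input where A raises IndexError: row > len(matrix), a kept row
-- shorter than col, or col+1 wrapping past the start of a kept row.
def Pre_get_matrix_excluding_row_and_col (matrix : List (List Int)) (row : Int) (col : Int) : Prop :=
  -1 ≤ row ∧ row ≤ (matrix.length : Int) ∧
  ∀ y : Nat, y < matrix.length → (y : Int) ≠ row →
    (0 ≤ col → col ≤ ((matrix.getD y []).length : Int)) ∧
    (col < 0 → -((matrix.getD y []).length : Int) ≤ col + 1)
instance (matrix : List (List Int)) (row : Int) (col : Int) : Decidable (Pre_get_matrix_excluding_row_and_col matrix row col) := by unfold Pre_get_matrix_excluding_row_and_col; infer_instance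

def pvWitness_get_matrix_excluding_row_and_col : List (List Int) × Int × Int := ([[1, 2], [3, 4]], 0, 0)

def Spec_get_matrix_excluding_row_and_col (matrix : List (List Int)) (row : Int) (col : Int) (out : List (List Int) × List (List Int) × List (List Int) × List (List Int)) : Prop := out = get_matrix_excluding_row_and_col_alt matrix row col
instance (matrix : List (List Int)) (row : Int) (col : Int) (out : List (List Int) × List (List Int) × List (List Int) × List (List Int)) : Decidable (Spec_get_matrix_excluding_row_and_col matrix row col out) := by unfold Spec_get_matrix_excluding_row_and_col; infer_instance

-- ===== CLAIM (what is proved, stated in full; the proofs are below) =====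
def Claim_equal_get_matrix_excluding_row_and_col : Prop := ∀ (matrix : List (List Int)) (row : Int) (col : Int), Dom_get_matrix_excluding_row_and_col matrix row col → Pre_get_matrix_excluding_row_and_col matrix row col → Spec_get_matrix_excluding_row_and_col matrix row col (get_matrix_excluding_row_and_col matrix row col)

-- ===== LEMMAS AND PROOFS =====

-- B's routing fold splits the index list by comparison with `row`.
theorem pv_fold_split (row : Int) (Lf Rf : Int → List Int) :
    ∀ (ys : List Int) (a b c d : List (List Int)),
      ys.foldl
        (fun st y =>
          if y = row then st
          else if y < row then
            (st.1 ++ [Lf y], st.2.1, st.2.2.1 ++ [Rf y], st.2.2.2)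
          else
            (st.1, st.2.1 ++ [Lf y], st.2.2.1, st.2.2.2 ++ [Rf y]))
        (a, b, c, d)
      = (a ++ (ys.filter (fun y => decide (y < row))).map Lf,
         b ++ (ys.filter (fun y => decide (row < y))).map Lf,
         c ++ (ys.filter (fun y => decide (y < row))).map Rf,
         d ++ (ys.filter (fun y => decide (row < y))).map Rf) := by
  intro ys
  induction ys with
  | nil => intro a b c d; simp
  | cons y ys ih =>
    intro a b c d
    simp only [List.foldl_cons, List.filter_cons]
    by_cases hy : y = row
    · rw [if_pos hy, ih]
      subst hy
      simp
    · rw [if_neg hy]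
      by_cases hlt : y < row
      · have hnr : ¬ row < y := by omega
        rw [if_pos hlt, ih]
        simp [hlt, hnr]
      · have hgt : row < y := by omega
        rw [if_neg hlt, ih]
        simp [hlt, hgt]

theorem pv_filter_lt (row L : Int) (h0 : -1 ≤ row) (hL : row ≤ L) :
    (PySem.List.pyRange 0 L 1).filter (fun y => decide (y < row)) = PySem.List.pyRange 0 row 1 := by
  by_cases hr : row ≤ 0
  · have h1 : PySem.List.pyRange 0 row 1 = [] := PySem.List.pyRange_one_eq_nil hr
    rw [h1, List.filter_eq_nil_iff]
    intro y hy
    have := (PySem.List.mem_pyRange_one).mp hy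
    simp only [decide_eq_true_eq]
    omega
  · push Not at hr
    rw [PySem.List.pyRange_one_append 0 row L (by omega) hL, List.filter_append]
    have h1 : (PySem.List.pyRange 0 row 1).filter (fun y => decide (y < row))
        = PySem.List.pyRange 0 row 1 := by
      rw [List.filter_eq_self]
      intro y hy
      have := (PySem.List.mem_pyRange_one).mp hy
      simp only [decide_eq_true_eq]
      omega
    have h2 : (PySem.List.pyRange row L 1).filter (fun y => decide (y < row)) = [] := by
      rw [List.filter_eq_nil_iff]
      intro y hy
      have := (PySem.List.mem_pyRange_one).mp hy
      simp only [decide_eq_true_eq]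
      omega
    rw [h1, h2, List.append_nil]

theorem pv_filter_gt (row L : Int) (h0 : -1 ≤ row) (hL : row ≤ L) :
    (PySem.List.pyRange 0 L 1).filter (fun y => decide (row < y)) = PySem.List.pyRange (row + 1) L 1 := by
  by_cases hr : row < 0
  · have hrow : row = -1 := by omega
    subst hrow
    simp only [neg_add_cancel]
    rw [List.filter_eq_self]
    intro y hy
    have := (PySem.List.mem_pyRange_one).mp hy
    simp only [decide_eq_true_eq]
    omega
  · push Not at hr
    rw [PySem.List.pyRange_one_append 0 row L hr hL, List.filter_append]
    have h1 : (PySem.List.pyRange 0 row 1).filter (fun y => decide (row < y)) = [] := by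
      rw [List.filter_eq_nil_iff]
      intro y hy
      have := (PySem.List.mem_pyRange_one).mp hy
      simp only [decide_eq_true_eq]
      omega
    have h2 : (PySem.List.pyRange row L 1).filter (fun y => decide (row < y))
        = PySem.List.pyRange (row + 1) L 1 := by
      by_cases hlt : row < L
      · rw [PySem.List.pyRange_one_cons hlt, List.filter_cons]
        have hself : (decide (row < row)) = false := by simp
        rw [hself]
        simp only [Bool.false_eq_true, if_false]
        rw [List.filter_eq_self]
        intro y hy
        have := (PySem.List.mem_pyRange_one).mp hy
        simp only [decide_eq_true_eq]
        omega
      · rw [PySem.List.pyRange_one_eq_nil (by omega), PySem.List.pyRange_one_eq_nil (by omega)]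
        rfl
    rw [h1, h2, List.nil_append]

-- ===== VERDICT (by name: the statement is the Claim_ definition above) =====
theorem get_matrix_excluding_row_and_col_spec : Claim_equal_get_matrix_excluding_row_and_col := by
  intro matrix row col _hDom hPre
  obtain ⟨h0, hL, _⟩ := hPre
  unfold Spec_get_matrix_excluding_row_and_col
  unfold get_matrix_excluding_row_and_col get_matrix_excluding_row_and_col_alt
  rw [pv_fold_split row (pvLeftHalf matrix col) (pvRightHalf matrix col)
      (PySem.List.pyRange 0 (matrix.length : Int) 1) [] [] [] []]
  rw [pv_filter_lt row (matrix.length : Int) h0 hL,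
      pv_filter_gt row (matrix.length : Int) h0 hL]
  simp only [PySem.List.foldl_append_singleton_eq_map, List.nil_append]
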